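-- pv_equiv track=rewrite | github.com/gexahedron/cycle-double-covers | unit_vector_flows/s2nz5flow.py | filter_trinities
-- ===== SOURCE A (Python) =====
-- import copy
--
-- def filter_trinities(trinities):
--     while True:
--         prev_size = len(trinities)
--         counts = dict()
--         for t in trinities:
--             for i in range(len(t)):
--                 if t[i] not in counts:
--                     counts[t[i]] = 0
--                 counts[t[i]] += 1
--         new_trinities = set()
--         for t in trinities:
--             ones = 0
--             for i in range(len(t)):
--                 if counts[t[i]] == 1:
--                     ones += 1
--             if ones < 1: # probably don't need a fix, but previously FIXME should be "if ones < 2:"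
--                 new_trinities.add(t)
--         trinities = copy.deepcopy(new_trinities)
--         if len(trinities) == prev_size:
--             break
--     return trinities
-- ===== SOURCE B (Python) =====
-- # Worklist ("peeling") re-implementation: an element->trinities index and live
-- # counts, decremented incrementally, drive a stack of trinities that contain a
-- # globally-unique element, instead of recounting everything round after round.
-- def filter_trinities(trinities):
--     trinities = list(trinities)
--     counts = {}
--     for t in trinities:
--         for x in t:
--             counts[x] = counts.get(x, 0) + 1
--     index = {}
--     for i, t in enumerate(trinities):
--         for x in t:
--             index.setdefault(x, []).append(i)
--     alive = [True] * len(trinities)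
--     stack = [i for i, t in enumerate(trinities) if any(counts[x] == 1 for x in t)]
--     while stack:
--         i = stack.pop()
--         if not alive[i]:
--             continue
--         alive[i] = False
--         for x in trinities[i]:
--             counts[x] -= 1
--             if counts[x] == 1:
--                 stack.extend(j for j in index[x] if alive[j])
--     return {tuple(t) for i, t in enumerate(trinities) if alive[i]}
-- ===== Notes on version B (the rewrite author's own statement) =====
-- stated objective: alternative
-- what changed: replaces A's repeated full rounds (rebuild the element-count dict and re-filter the surviving set until its size stabilises) with a single worklist peeling pass: an element->trinities index plus incrementally decremented live counts drive a stack of trinities that contain a globally-unique element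
import Mathlib
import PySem

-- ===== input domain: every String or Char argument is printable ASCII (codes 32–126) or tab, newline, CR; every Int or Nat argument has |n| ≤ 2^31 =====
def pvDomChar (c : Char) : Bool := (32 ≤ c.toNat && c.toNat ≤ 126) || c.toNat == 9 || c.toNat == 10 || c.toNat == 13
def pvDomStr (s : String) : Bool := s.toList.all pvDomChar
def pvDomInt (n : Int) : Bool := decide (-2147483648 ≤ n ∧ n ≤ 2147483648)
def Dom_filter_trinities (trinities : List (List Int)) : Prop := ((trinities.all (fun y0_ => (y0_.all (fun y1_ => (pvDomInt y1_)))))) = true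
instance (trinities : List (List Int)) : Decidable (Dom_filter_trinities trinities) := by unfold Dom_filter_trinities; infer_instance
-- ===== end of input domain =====

-- B replaces A's repeated full recount-and-refilter rounds by a one-pass worklist peeling
-- driven by an element→trinities index (objective: alternative algorithm, same observable value).
-- Note: A mutates nothing; B mutates only its own locals.

-- ===== PORT A =====
-- `if t[i] not in counts: counts[t[i]] = 0` followed by `counts[t[i]] += 1`
def pvStepA (c : PySem.Dict Int Int) (x : Int) : PySem.Dict Int Int :=
  let c1 := if c.contains x then c else c.insert x 0
  c1.insert x (c1.getD x 0 + 1)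

def pvCountsA (tr : List (List Int)) : PySem.Dict Int Int :=
  tr.foldl (fun c t => t.foldl pvStepA c) PySem.Dict.empty

-- one iteration of A's `while True` body: counts, then the surviving set (a PySem.Set,
-- returned as its distinct-elements list; `copy.deepcopy` of immutable data is the identity)
def pvRoundA (tr : List (List Int)) : List (List Int) :=
  let counts := pvCountsA tr
  tr.foldl
    (fun (s : PySem.Set (List Int)) t =>
      let ones := t.foldl (fun (o : Int) x => if counts.getD x 0 = 1 then o + 1 else o) 0
      if ones < 1 then PySem.Set.add s t else s)
    PySem.Set.empty

-- A's `while True: … if len(trinities) == prev_size: break`; each non-breaking round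
-- yields a strictly shorter (nodup) list, so `length + 1` rounds of fuel always suffice.
def pvLoopA : Nat → List (List Int) → List (List Int)
  | 0, tr => tr
  | fuel + 1, tr =>
      let prev := tr.length
      let tr' := pvRoundA tr
      if tr'.length = prev then tr' else pvLoopA fuel tr'

def filter_trinities (trinities : List (List Int)) : List (List Int) :=
  pvLoopA (trinities.length + 1) trinities

-- ===== PORT B =====
def pvCountsB (tr : List (List Int)) : PySem.Dict Int Int :=
  tr.foldl (fun c t => t.foldl (fun (d : PySem.Dict Int Int) x => d.insert x (d.getD x 0 + 1)) c)
    PySem.Dict.empty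

-- `index.setdefault(x, []).append(i)`
def pvIndexB (tr : List (List Int)) : PySem.Dict Int (List Int) :=
  (PySem.List.enumerate tr).foldl
    (fun d p => p.2.foldl (fun (d : PySem.Dict Int (List Int)) x => d.modify x [] (· ++ [p.1])) d)
    PySem.Dict.empty

-- termination helpers for the worklist loop (cited in decreasing_by)
theorem pv_count_set_false_lt (l : List Bool) (n : Nat) (h : n < l.length) (ht : l[n] = true) :
    (l.set n false).count true < l.count true := by
  induction l generalizing n with
  | nil => simp at h
  | cons a l ih =>
    cases n with
    | zero => simp_all
    | succ m =>
      simp only [List.set_cons_succ, List.count_cons]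
      have := ih m (by simpa using h) (by simpa using ht)
      omega

theorem pv_pySetD_spec (alive : List Bool) (i : Int)
    (h : PySem.List.pyGet? alive i = some true) :
    ∃ n : Nat, ∃ _ : n < alive.length, alive[n] = true ∧
      PySem.List.pySetD alive i false = alive.set n false ∧ (∀ k : Nat, (k : Int) = i → k = n) ∧
      PySem.List.pyIdx? alive.length i = some n := by
  simp only [PySem.List.pyGet?] at h
  rcases hn : PySem.List.pyIdx? alive.length i with _ | n
  · rw [hn] at h; simp at h
  · rw [hn] at h
    simp only [Option.bind_some] at h
    obtain ⟨hlt, ha⟩ := List.getElem?_eq_some_iff.mp h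
    refine ⟨n, hlt, ha, ?_, ?_, by simp⟩
    · simp [PySem.List.pySetD, PySem.List.pySet?, hn]
    · intro k hk
      subst hk
      simp only [PySem.List.pyIdx?] at hn
      split_ifs at hn with h1 h2 h3 <;>
        (have := Option.some.inj hn; omega)

theorem pv_count_pySetD_lt (alive : List Bool) (i : Int)
    (h : PySem.List.pyGet? alive i = some true) :
    (PySem.List.pySetD alive i false).count true < alive.count true := by
  obtain ⟨n, hn, ht, he, -, -⟩ := pv_pySetD_spec alive i h
  rw [he]; exact pv_count_set_false_lt alive n hn ht

theorem pv_dropLast_lt (stack : List Int) (i : Int) (h : stack.getLast? = some i) :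
    stack.dropLast.length < stack.length := by
  have hne : stack ≠ [] := by intro e; subst e; simp at h
  have := List.length_pos_iff.mpr hne
  simp [List.length_dropLast]; omega

-- `while stack:` — pops the last element, skips dead entries, kills a live trinity,
-- decrements the counts of its elements and extends the stack from the index.
def pvLoopB (tr : List (List Int)) (index : PySem.Dict Int (List Int)) :
    List Int → List Bool → PySem.Dict Int Int → List Bool
  | stack, alive, counts =>
    match hs : stack.getLast? with
    | none => alive
    | some i =>
      let rest := stack.dropLast
      if hA : PySem.List.pyGet? alive i = some true then
        let alive' := PySem.List.pySetD alive i false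
        let res := (PySem.List.pyGetD tr i []).foldl
          (fun (p : PySem.Dict Int Int × List Int) x =>
            let c := p.1.insert x (p.1.getD x 0 - 1)
            if c.getD x 0 = 1 then
              (c, p.2 ++ (index.getD x []).filter (fun j => PySem.List.pyGetD alive' j false))
            else (c, p.2))
          (counts, ([] : List Int))
        pvLoopB tr index (rest ++ res.2) alive' res.1
      else
        pvLoopB tr index rest alive counts
  termination_by stack alive _ => (alive.count true, stack.length)
  decreasing_by
  · exact Prod.Lex.left _ _ (pv_count_pySetD_lt alive i hA)
  · exact Prod.Lex.right _ (pv_dropLast_lt stack i hs)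

def filter_trinities_alt (trinities : List (List Int)) : List (List Int) :=
  let counts := pvCountsB trinities
  let index := pvIndexB trinities
  let alive := List.replicate trinities.length true
  let stack := ((PySem.List.enumerate trinities).filter
      (fun p => p.2.any (fun x => counts.getD x 0 == 1))).map (·.1)
  let aliveF := pvLoopB trinities index stack alive counts
  PySem.Set.ofList (((PySem.List.enumerate trinities).filter
      (fun p => PySem.List.pyGetD aliveF p.1 false)).map (·.2))

-- ===== PRECONDITION & SPEC =====
-- The Python argument is a SET of tuples, which can never contain two equal trinities; Pre_
-- excludes only the duplicate-carrying lists, which encode no Python input (A deduplicates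
-- between rounds via `set`, so on such lists the two algorithms may legitimately differ).
def Pre_filter_trinities (trinities : List (List Int)) : Prop :=
  trinities.Nodup
instance (trinities : List (List Int)) : Decidable (Pre_filter_trinities trinities) := by
  unfold Pre_filter_trinities; infer_instance

def pvWitness_filter_trinities : List (List Int) := [[1, 2], [2, 3]]

def Spec_filter_trinities (trinities : List (List Int)) (out : List (List Int)) : Prop :=
  out = filter_trinities_alt trinities
instance (trinities : List (List Int)) (out : List (List Int)) :
    Decidable (Spec_filter_trinities trinities out) := by
  unfold Spec_filter_trinities; infer_instance

-- ===== CLAIM (what is proved, stated in full; the proofs are below) =====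
def Claim_equal_filter_trinities : Prop :=
  ∀ (trinities : List (List Int)), Dom_filter_trinities trinities →
    Pre_filter_trinities trinities →
    Spec_filter_trinities trinities (filter_trinities trinities)

-- ===== LEMMAS AND PROOFS =====

-- both algorithms compute the unique maximal "violator-free" subfamily: a trinity violates
-- when one of its elements occurs exactly once in the whole surviving family
def pvVF (U : List (List Int)) : Prop := ∀ t ∈ U, ∀ x ∈ t, U.flatten.count x ≠ 1

-- occurrence count of x over the alive part of T (B's view of the family)
def pvCnt : List (List Int) → List Bool → Int → Nat
  | [], _, _ => 0
  | _ :: _, [], _ => 0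
  | t :: T, b :: al, x => (if b then t.count x else 0) + pvCnt T al x

-- the alive sublist itself
def pvSurv : List (List Int) → List Bool → List (List Int)
  | [], _ => []
  | _ :: _, [] => []
  | t :: T, b :: al => if b then t :: pvSurv T al else pvSurv T al

-- ---- generic list facts ----
theorem pv_count_le_flatten (U : List (List Int)) (t : List Int) (x : Int)
    (h : t ∈ U) : t.count x ≤ U.flatten.count x := by
  induction U with
  | nil => simp at h
  | cons u U ih =>
    rcases List.mem_cons.mp h with rfl | hm
    · simp [List.count_append]
    · simp only [List.flatten_cons, List.count_append]
      exact Nat.le_add_left _ _ |>.trans' (ih hm) |>.trans (Nat.le_refl _)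

theorem pv_subset_flatten_count_le (S U : List (List Int)) (x : Int)
    (hS : S.Nodup) (hsub : S ⊆ U) : S.flatten.count x ≤ U.flatten.count x := by
  obtain ⟨S', hperm, hsl⟩ := hS.subperm hsub
  calc S.flatten.count x = S'.flatten.count x := (hperm.flatten.count_eq x).symm
    _ ≤ U.flatten.count x := hsl.flatten.count_le x

theorem pv_filter_mem_sublist (T U : List (List Int)) (hT : T.Nodup) (h : U.Sublist T) :
    T.filter (fun t => decide (t ∈ U)) = U := by
  induction h with
  | slnil => rfl
  | cons a h ih =>
    rename_i U T'
    have ha : a ∉ U := fun hm => (List.nodup_cons.mp hT).1 (h.subset hm)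
    simp only [List.filter_cons, decide_eq_true_eq]
    rw [if_neg (by simpa using ha)]
    exact ih (List.nodup_cons.mp hT).2
  | cons₂ a h ih =>
    rename_i U T'
    have haT : a ∉ T' := (List.nodup_cons.mp hT).1
    simp only [List.filter_cons, decide_eq_true_eq, if_pos List.mem_cons_self]
    have : T'.filter (fun t => decide (t ∈ a :: U)) = T'.filter (fun t => decide (t ∈ U)) := by
      refine List.filter_congr (fun b hb => ?_)
      have hba : b ≠ a := fun e => haT (e ▸ hb)
      simp [List.mem_cons, hba]
    rw [this, ih (List.nodup_cons.mp hT).2]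

theorem pv_sublist_eq_of_mem_iff (T U V : List (List Int)) (hT : T.Nodup)
    (hU : U.Sublist T) (hV : V.Sublist T) (h : ∀ t, t ∈ U ↔ t ∈ V) : U = V := by
  rw [← pv_filter_mem_sublist T U hT hU, ← pv_filter_mem_sublist T V hT hV]
  exact List.filter_congr (fun t _ => by simp [h t])

theorem pv_foldl_add_filter (p : List Int → Prop) [DecidablePred p] :
    ∀ (l s : List (List Int)), l.Nodup → (∀ a ∈ l, a ∉ s) →
      l.foldl (fun s a => if p a then PySem.Set.add s a else s) s
        = s ++ l.filter (fun a => decide (p a)) := by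
  intro l
  induction l with
  | nil => intro s _ _; simp
  | cons a l ih =>
    intro s hn hd
    by_cases hp : p a
    · rw [List.foldl_cons, if_pos hp,
        PySem.Set.add_of_not_mem (hd a List.mem_cons_self),
        ih _ (List.nodup_cons.mp hn).2 (fun b hb => by
          intro hbs
          rcases List.mem_append.mp hbs with h1 | h2
          · exact hd b (List.mem_cons_of_mem _ hb) h1
          · exact (List.nodup_cons.mp hn).1 ((List.mem_singleton.mp h2) ▸ hb))]
      simp [hp, List.filter_cons]
    · rw [List.foldl_cons, if_neg hp,
        ih _ (List.nodup_cons.mp hn).2 (fun b hb => hd b (List.mem_cons_of_mem _ hb))]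
      simp [hp, List.filter_cons]

theorem pv_ofList_nodup (l : List (List Int)) (h : l.Nodup) : PySem.Set.ofList l = l := by
  suffices hgen : ∀ (l s : List (List Int)), (∀ a ∈ l, a ∉ s) → l.Nodup →
      l.foldl PySem.Set.add s = s ++ l by
    simpa using hgen l [] (by simp) h
  intro l
  induction l with
  | nil => intro s _ _; simp
  | cons a l ih =>
    intro s hd hn
    rw [List.foldl_cons, PySem.Set.add_of_not_mem (hd a List.mem_cons_self),
      ih _ (fun b hb hbs => by
        rcases List.mem_append.mp hbs with h1 | h2
        · exact hd b (List.mem_cons_of_mem _ hb) h1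
        · exact (List.nodup_cons.mp hn).1 ((List.mem_singleton.mp h2) ▸ hb))
        (List.nodup_cons.mp hn).2]
    simp

-- ---- A side: one round is a filter, the loop reaches the maximal violator-free family ----
theorem pv_getD_stepA (d : PySem.Dict Int Int) (x v : Int) :
    (pvStepA d x).getD v 0 = if v = x then d.getD v 0 + 1 else d.getD v 0 := by
  unfold pvStepA
  by_cases hv : v = x
  · subst hv
    by_cases hc : d.contains v
    · simp [hc, PySem.Dict.getD_insert]
    · have hcf : d.contains v = false := by simpa using hc
      simp [hcf, PySem.Dict.getD_insert,
        PySem.Dict.getD_of_not_contains d (0 : Int) hcf]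
  · by_cases hc : d.contains x <;> simp [hc, PySem.Dict.getD_insert, hv]

theorem pv_getD_foldl_stepA (l : List Int) (d : PySem.Dict Int Int) (v : Int) :
    (l.foldl pvStepA d).getD v 0 = d.getD v 0 + (l.count v : Int) := by
  induction l generalizing d with
  | nil => simp
  | cons x l ih =>
    rw [List.foldl_cons, ih, pv_getD_stepA]
    by_cases hv : v = x <;> simp [List.count_cons, hv] <;> push_cast <;> omega

theorem pv_countsA_getD (tr : List (List Int)) (v : Int) :
    (pvCountsA tr).getD v 0 = (tr.flatten.count v : Int) := by
  suffices h : ∀ (tr : List (List Int)) (d : PySem.Dict Int Int),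
      (tr.foldl (fun c t => t.foldl pvStepA c) d).getD v 0
        = d.getD v 0 + (tr.flatten.count v : Int) by
    simpa [pvCountsA] using h tr PySem.Dict.empty
  intro tr
  induction tr with
  | nil => simp
  | cons t ts ih =>
    intro d
    rw [List.foldl_cons, ih, pv_getD_foldl_stepA]
    simp [List.count_append]
    ring

theorem pv_roundA_eq_filter (U : List (List Int)) (h : U.Nodup) :
    pvRoundA U = U.filter (fun t => decide (∀ x ∈ t, ¬ U.flatten.count x = 1)) := by
  unfold pvRoundA
  rw [pv_foldl_add_filter
    (p := fun t => (t.foldl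
      (fun (o : Int) x => if (pvCountsA U).getD x 0 = 1 then o + 1 else o) 0) < 1)
    U PySem.Set.empty h (by intro a _ hm; simp [PySem.Set.empty] at hm)]
  rw [show (PySem.Set.empty : PySem.Set (List Int)) ++ _ = _ from List.nil_append _]
  refine List.filter_congr (fun t ht => ?_)
  rw [PySem.List.foldl_ite_add_one]
  refine decide_eq_decide.mpr ?_
  simp only [zero_add]
  constructor
  · intro hlt x hx hc1
    have h0 : t.countP (fun x => decide ((pvCountsA U).getD x 0 = 1)) = 0 := by
      omega
    have := List.countP_eq_zero.mp h0 x hx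
    simp only [decide_eq_true_eq] at this
    exact this (by rw [pv_countsA_getD, hc1]; norm_num)
  · intro hall
    have h0 : t.countP (fun x => decide ((pvCountsA U).getD x 0 = 1)) = 0 := by
      refine List.countP_eq_zero.mpr (fun x hx => ?_)
      simp only [decide_eq_true_eq]
      intro hc
      rw [pv_countsA_getD] at hc
      exact hall x hx (by exact_mod_cast hc)
    omega

theorem pv_loopA_master : ∀ (fuel : Nat) (U : List (List Int)), U.Nodup → U.length < fuel →
    (pvLoopA fuel U).Sublist U ∧ pvVF (pvLoopA fuel U) ∧
    (∀ S, S.Nodup → pvVF S → S ⊆ U → S ⊆ pvLoopA fuel U) := by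
  intro fuel
  induction fuel with
  | zero => intro U _ hlen; omega
  | succ f ih =>
    intro U hU hlen
    rw [pvLoopA]
    by_cases hbr : (pvRoundA U).length = U.length
    · rw [if_pos hbr]
      have hfilter := pv_roundA_eq_filter U hU
      have hall := List.length_filter_eq_length_iff.mp (by rw [← hfilter]; exact hbr)
      have heq : pvRoundA U = U := by rw [hfilter]; exact List.filter_eq_self.mpr hall
      rw [heq]
      refine ⟨List.Sublist.refl U, ?_, fun S _ _ hSU => hSU⟩
      intro t ht x hx
      have := hall t ht
      simp only [decide_eq_true_eq] at this
      exact this x hx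
    · rw [if_neg hbr]
      have hsub : (pvRoundA U).Sublist U := by
        rw [pv_roundA_eq_filter U hU]; exact List.filter_sublist
      have hnd : (pvRoundA U).Nodup := hsub.nodup hU
      have hlt : (pvRoundA U).length < f := by
        have h1 := hsub.length_le
        omega
      obtain ⟨s1, v1, m1⟩ := ih (pvRoundA U) hnd hlt
      refine ⟨s1.trans hsub, v1, ?_⟩
      intro S hSn hSv hSU
      refine m1 S hSn hSv ?_
      rw [pv_roundA_eq_filter U hU]
      intro t htS
      refine List.mem_filter.mpr ⟨hSU htS, ?_⟩
      simp only [decide_eq_true_eq]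
      intro x hx hc1
      have h1 : S.flatten.count x ≤ 1 := by
        have := pv_subset_flatten_count_le S U x hSn hSU
        omega
      have h2 : 1 ≤ S.flatten.count x := by
        have ht1 : 0 < t.count x := List.count_pos_iff.mpr hx
        have := pv_count_le_flatten S t x htS
        omega
      exact hSv t htS x hx (by omega)

-- ---- counting over alive flags ----
theorem pv_cnt_replicate (T : List (List Int)) (x : Int) :
    pvCnt T (List.replicate T.length true) x = T.flatten.count x := by
  induction T with
  | nil => rfl
  | cons t T ih => simp [pvCnt, List.replicate_succ, List.count_append, ih]

theorem pv_cnt_kill (T : List (List Int)) (al : List Bool) (k : Nat) (x : Int)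
    (hlen : al.length = T.length) (hk : k < T.length) (hal : al.getD k false = true) :
    pvCnt T al x = (T.getD k []).count x + pvCnt T (al.set k false) x := by
  induction T generalizing al k with
  | nil => simp at hk
  | cons t T ih =>
    cases al with
    | nil => simp at hlen
    | cons b al =>
      cases k with
      | zero =>
        simp only [List.getD_cons_zero] at hal
        subst hal
        simp [pvCnt, List.set_cons_zero]
      | succ m =>
        simp only [List.getD_cons_succ] at hal
        simp only [List.set_cons_succ, pvCnt, List.getD_cons_succ]
        rw [ih al m (by simpa using hlen) (by simpa using hk) hal]
        omega

theorem pv_cnt_mono (T : List (List Int)) (S al : List Bool) (x : Int)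
    (hS : S.length = T.length) (hal : al.length = T.length)
    (h : ∀ k, k < T.length → S.getD k false = true → al.getD k false = true) :
    pvCnt T S x ≤ pvCnt T al x := by
  induction T generalizing S al with
  | nil => simp [pvCnt]
  | cons t T ih =>
    cases S with
    | nil => simp at hS
    | cons sb S =>
      cases al with
      | nil => simp at hal
      | cons ab al =>
        simp only [pvCnt]
        have h0 := h 0 (by simp)
        simp only [List.getD_cons_zero] at h0
        have htail : pvCnt T S x ≤ pvCnt T al x := by
          refine ih S al (by simpa using hS) (by simpa using hal) (fun k hk hSk => ?_)
          have := h (k + 1) (by simpa using Nat.succ_lt_succ hk)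
          simp only [List.getD_cons_succ] at this
          exact this hSk
        cases sb with
        | false =>
          simp only [Bool.false_eq_true, if_false, Nat.zero_add]
          exact htail.trans (Nat.le_add_left _ _)
        | true =>
          rw [h0 rfl]
          simpa using Nat.add_le_add_left htail (t.count x)

theorem pv_cnt_lower (T : List (List Int)) (al : List Bool) (k : Nat) (x : Int)
    (hlen : al.length = T.length) (hk : k < T.length) (hal : al.getD k false = true)
    (hx : x ∈ T.getD k []) : 1 ≤ pvCnt T al x := by
  rw [pv_cnt_kill T al k x hlen hk hal]
  have := List.count_pos_iff.mpr hx
  omega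

theorem pv_surv_flatten_count (T : List (List Int)) (al : List Bool) (x : Int)
    (hlen : al.length = T.length) :
    (pvSurv T al).flatten.count x = pvCnt T al x := by
  induction T generalizing al with
  | nil => cases al <;> rfl
  | cons t T ih =>
    cases al with
    | nil => simp at hlen
    | cons b al =>
      rcases b with _ | _ <;>
        simp [pvSurv, pvCnt, List.count_append, ih al (by simpa using hlen)]

theorem pv_surv_sublist (T : List (List Int)) (al : List Bool) : (pvSurv T al).Sublist T := by
  induction T generalizing al with
  | nil => cases al <;> simp [pvSurv]
  | cons t T ih =>
    cases al with
    | nil => simp [pvSurv]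
    | cons b al =>
      rcases b with _ | _
      · simp only [pvSurv, Bool.false_eq_true, if_false]
        exact (ih al).trans (List.sublist_cons_self _ _)
      · simpa [pvSurv] using List.Sublist.cons₂ t (ih al)

theorem pv_surv_mem (T : List (List Int)) (al : List Bool) (t : List Int)
    (hlen : al.length = T.length) :
    t ∈ pvSurv T al ↔ ∃ k, k < T.length ∧ al.getD k false = true ∧ T.getD k [] = t := by
  induction T generalizing al with
  | nil => simp [pvSurv]
  | cons u T ih =>
    cases al with
    | nil => simp at hlen
    | cons b al =>
      have ihs := ih al (by simpa using hlen)
      rcases b with _ | _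
      · simp only [pvSurv, Bool.false_eq_true, if_false]
        rw [ihs]
        constructor
        · rintro ⟨k, hk, ha, he⟩
          exact ⟨k + 1, by simpa using Nat.succ_lt_succ hk, by simpa using ha, by simpa using he⟩
        · rintro ⟨k, hk, ha, he⟩
          cases k with
          | zero => simp at ha
          | succ m =>
            exact ⟨m, by simpa using hk, by simpa using ha, by simpa using he⟩
      · simp only [pvSurv, if_true, List.mem_cons]
        rw [ihs]
        constructor
        · rintro (rfl | ⟨k, hk, ha, he⟩)
          · exact ⟨0, by simp, by simp, by simp⟩
          · exact ⟨k + 1, by simpa using Nat.succ_lt_succ hk, by simpa using ha, by simpa using he⟩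
        · rintro ⟨k, hk, ha, he⟩
          cases k with
          | zero => left; simpa using he.symm
          | succ m =>
            right
            exact ⟨m, by simpa using hk, by simpa using ha, by simpa using he⟩

theorem pv_surv_of_range_pred (T : List (List Int)) (p : List Int → Bool) :
    pvSurv T ((List.range T.length).map (fun k => p (T.getD k []))) = T.filter p := by
  induction T with
  | nil => rfl
  | cons t T ih =>
    rw [List.length_cons, List.range_succ_eq_map, List.map_cons, List.map_map]
    have h1 : ((fun k => p ((t :: T).getD k [])) ∘ Nat.succ) = (fun k => p (T.getD k [])) := by
      funext k; simp
    rw [h1]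
    simp only [List.getD_cons_zero]
    cases hp : p t with
    | false =>
      simp only [pvSurv, Bool.false_eq_true, if_false]
      rw [ih, List.filter_cons]
      simp [hp]
    | true =>
      simp only [pvSurv, if_true]
      rw [ih, List.filter_cons]
      simp [hp]

theorem pv_getD_set_false_le (al : List Bool) (n k : Nat) :
    (al.set n false).getD k false = true → al.getD k false = true := by
  intro h
  by_cases hk : k = n
  · subst hk
    by_cases hlt : k < al.length
    · rw [List.getD, List.getElem?_set_self hlt] at h
      exact absurd h (by simp)
    · rw [List.getD, List.getElem?_eq_none (by simpa using Nat.le_of_not_lt hlt)] at h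
      exact absurd h (by simp)
  · rwa [List.getD, List.getElem?_set_ne (Ne.symm hk)] at h

theorem pv_getD_set_self (al : List Bool) (n : Nat) (hn : n < al.length) :
    (al.set n false).getD n false = false := by
  rw [List.getD, List.getElem?_set_self hn]
  rfl

-- ---- helper: pyGetD through a known normalized index ----
theorem pv_pyGetD_of_idx {α : Type} (xs : List α) (i : Int) (k : Nat) (d : α)
    (hn : PySem.List.pyIdx? xs.length i = some k) :
    PySem.List.pyGetD xs i d = xs.getD k d := by
  simp only [PySem.List.pyGetD, PySem.List.pyGet?, hn, Option.bind_some]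
  rfl

-- ---- B side: the element→indices map ----
theorem pv_index_mem (T : List (List Int)) (x j : Int) :
    j ∈ (pvIndexB T).getD x [] ↔
      ∃ k : Nat, k < T.length ∧ j = (k : Int) ∧ x ∈ T.getD k [] := by
  have hfold : ∀ (l : List (Int × List Int)) (d : PySem.Dict Int (List Int)),
      l.foldl (fun d p => p.2.foldl
        (fun (d : PySem.Dict Int (List Int)) x => d.modify x [] (· ++ [p.1])) d) d
        = (l.flatMap (fun p => p.2.map (fun y => (y, p.1)))).foldl
            (fun d q => d.modify q.1 [] (· ++ [q.2])) d := by
    intro l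
    induction l with
    | nil => intro d; rfl
    | cons p l ih =>
      intro d
      rw [List.foldl_cons, List.flatMap_cons, List.foldl_append, ih, List.foldl_map]
  unfold pvIndexB
  rw [hfold, PySem.Dict.getD_foldl_modify_append]
  rw [PySem.Dict.getD_empty, List.nil_append]
  constructor
  · intro hm
    obtain ⟨q, hq, hj⟩ := List.mem_map.mp hm
    obtain ⟨hqm, hbeq⟩ := List.mem_filter.mp hq
    obtain ⟨p, hp, hqmem⟩ := List.mem_flatMap.mp hqm
    obtain ⟨y, hy, hqe⟩ := List.mem_map.mp hqmem
    obtain ⟨k, hk, hpe⟩ := (PySem.List.mem_enumerate_iff _ _ _).mp hp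
    subst hqe hpe
    simp only at hj hbeq hy
    have hx : y = x := by simpa using hbeq
    subst hx
    refine ⟨k, hk, by simpa using hj.symm, ?_⟩
    rw [List.getD_eq_getElem _ _ hk]
    simpa using hy
  · rintro ⟨k, hk, rfl, hx⟩
    refine List.mem_map.mpr ⟨(x, (k : Int)), List.mem_filter.mpr ⟨?_, by simp⟩, rfl⟩
    refine List.mem_flatMap.mpr ⟨((k : Int), T[k]), ?_, ?_⟩
    · exact (PySem.List.mem_enumerate_iff _ _ _).mpr ⟨k, hk, by simp⟩
    · refine List.mem_map.mpr ⟨x, ?_, rfl⟩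
      rw [List.getD_eq_getElem _ _ hk] at hx
      exact hx

-- ---- B side: the inner per-kill fold (decrement counts, collect pushes) ----
-- step function of the inner fold, parametrized by the index map and current alive flags
theorem pv_fold_counts (index : PySem.Dict Int (List Int)) (alv : List Bool) :
    ∀ (l : List Int) (c0 : PySem.Dict Int Int) (a0 : List Int) (v : Int),
      ((l.foldl (fun (p : PySem.Dict Int Int × List Int) x =>
          let c := p.1.insert x (p.1.getD x 0 - 1)
          if c.getD x 0 = 1 then
            (c, p.2 ++ (index.getD x []).filter (fun j => PySem.List.pyGetD alv j false))
          else (c, p.2)) (c0, a0)).1).getD v 0 = c0.getD v 0 - (l.count v : Int) := by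
  intro l
  induction l with
  | nil => intro c0 a0 v; simp
  | cons y l ih =>
    intro c0 a0 v
    rw [List.foldl_cons]
    dsimp only
    split <;>
    · rw [ih, PySem.Dict.getD_insert]
      by_cases hv : v = y <;> simp [hv, List.count_cons] <;> push_cast <;> omega

theorem pv_fold_acc_mono (index : PySem.Dict Int (List Int)) (alv : List Bool) :
    ∀ (l : List Int) (c0 : PySem.Dict Int Int) (a0 : List Int) (j : Int), j ∈ a0 →
      j ∈ (l.foldl (fun (p : PySem.Dict Int Int × List Int) x =>
          let c := p.1.insert x (p.1.getD x 0 - 1)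
          if c.getD x 0 = 1 then
            (c, p.2 ++ (index.getD x []).filter (fun j => PySem.List.pyGetD alv j false))
          else (c, p.2)) (c0, a0)).2 := by
  intro l
  induction l with
  | nil => intro c0 a0 j hj; simpa using hj
  | cons y l ih =>
    intro c0 a0 j hj
    rw [List.foldl_cons]
    dsimp only
    split
    · exact ih _ _ j (List.mem_append_left _ hj)
    · exact ih _ _ j hj

theorem pv_fold_sound (index : PySem.Dict Int (List Int)) (alv : List Bool) :
    ∀ (l : List Int) (c0 : PySem.Dict Int Int) (a0 : List Int) (j : Int),
      j ∈ (l.foldl (fun (p : PySem.Dict Int Int × List Int) x =>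
          let c := p.1.insert x (p.1.getD x 0 - 1)
          if c.getD x 0 = 1 then
            (c, p.2 ++ (index.getD x []).filter (fun j => PySem.List.pyGetD alv j false))
          else (c, p.2)) (c0, a0)).2 →
      j ∈ a0 ∨ ∃ x ∈ l, j ∈ index.getD x [] ∧ PySem.List.pyGetD alv j false = true ∧
        ((l.foldl (fun (p : PySem.Dict Int Int × List Int) x =>
          let c := p.1.insert x (p.1.getD x 0 - 1)
          if c.getD x 0 = 1 then
            (c, p.2 ++ (index.getD x []).filter (fun j => PySem.List.pyGetD alv j false))
          else (c, p.2)) (c0, a0)).1).getD x 0 ≤ 1 := by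
  intro l
  induction l with
  | nil => intro c0 a0 j hj; exact Or.inl (by simpa using hj)
  | cons y l ih =>
    intro c0 a0 j hj
    rw [List.foldl_cons] at hj ⊢
    dsimp only at hj ⊢
    by_cases h1 : ((c0.insert y (c0.getD y 0 - 1)).getD y 0 = 1)
    · rw [if_pos h1] at hj ⊢
      rcases ih _ _ j hj with hacc | ⟨x, hx, hrest⟩
      · rcases List.mem_append.mp hacc with ha0 | happ
        · exact Or.inl ha0
        · obtain ⟨hidx, hal⟩ := List.mem_filter.mp happ
          refine Or.inr ⟨y, List.mem_cons_self, hidx, by simpa using hal, ?_⟩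
          rw [pv_fold_counts index alv l _ _ y, h1]
          have : (0 : Int) ≤ (l.count y : Int) := by positivity
          omega
      · exact Or.inr ⟨x, List.mem_cons_of_mem _ hx, hrest⟩
    · rw [if_neg h1] at hj ⊢
      rcases ih _ _ j hj with hacc | ⟨x, hx, hrest⟩
      · exact Or.inl hacc
      · exact Or.inr ⟨x, List.mem_cons_of_mem _ hx, hrest⟩

theorem pv_fold_complete (index : PySem.Dict Int (List Int)) (alv : List Bool) :
    ∀ (l : List Int) (c0 : PySem.Dict Int Int) (a0 : List Int) (x : Int), x ∈ l →
      ((l.foldl (fun (p : PySem.Dict Int Int × List Int) x =>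
          let c := p.1.insert x (p.1.getD x 0 - 1)
          if c.getD x 0 = 1 then
            (c, p.2 ++ (index.getD x []).filter (fun j => PySem.List.pyGetD alv j false))
          else (c, p.2)) (c0, a0)).1).getD x 0 = 1 →
      ∀ j, j ∈ index.getD x [] → PySem.List.pyGetD alv j false = true →
      j ∈ (l.foldl (fun (p : PySem.Dict Int Int × List Int) x =>
          let c := p.1.insert x (p.1.getD x 0 - 1)
          if c.getD x 0 = 1 then
            (c, p.2 ++ (index.getD x []).filter (fun j => PySem.List.pyGetD alv j false))
          else (c, p.2)) (c0, a0)).2 := by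
  intro l
  induction l with
  | nil => intro c0 a0 x hx; simp at hx
  | cons y l ih =>
    intro c0 a0 x hx hfin j hj hal
    rw [List.foldl_cons] at hfin ⊢
    dsimp only at hfin ⊢
    by_cases hxl : x ∈ l
    · by_cases h1 : ((c0.insert y (c0.getD y 0 - 1)).getD y 0 = 1)
      · rw [if_pos h1] at hfin ⊢
        exact ih _ _ x hxl hfin j hj hal
      · rw [if_neg h1] at hfin ⊢
        exact ih _ _ x hxl hfin j hj hal
    · have hxy : x = y := by
        rcases List.mem_cons.mp hx with h | h
        · exact h
        · exact absurd h hxl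
      subst hxy
      have hcount : l.count x = 0 := List.count_eq_zero.mpr hxl
      by_cases h1 : ((c0.insert x (c0.getD x 0 - 1)).getD x 0 = 1)
      · rw [if_pos h1] at hfin ⊢
        refine pv_fold_acc_mono index alv l _ _ j (List.mem_append_right _ ?_)
        exact List.mem_filter.mpr ⟨hj, by simpa using hal⟩
      · exfalso
        rw [if_neg h1] at hfin
        rw [pv_fold_counts index alv l _ _ x, hcount] at hfin
        simp only [Nat.cast_zero, sub_zero] at hfin
        rw [PySem.Dict.getD_insert] at hfin h1
        simp only [if_pos rfl] at hfin h1
        exact h1 hfin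

-- ---- B side: the worklist loop kills exactly down to the maximal violator-free family ----
theorem pv_loopB_master (T : List (List Int)) (index : PySem.Dict Int (List Int))
    (HI : ∀ x j, j ∈ index.getD x [] ↔ ∃ k : Nat, k < T.length ∧ j = (k : Int) ∧ x ∈ T.getD k []) :
    ∀ (stack : List Int) (alive : List Bool) (counts : PySem.Dict Int Int),
      alive.length = T.length →
      (∀ x, counts.getD x 0 = (pvCnt T alive x : Int)) →
      (∀ j ∈ stack, ∃ k : Nat, j = (k : Int) ∧ k < T.length ∧
          (alive.getD k false = true → ∃ x ∈ T.getD k [], pvCnt T alive x = 1)) →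
      (∀ k, k < T.length → alive.getD k false = true →
          (∃ x ∈ T.getD k [], pvCnt T alive x = 1) → (k : Int) ∈ stack) →
      (pvLoopB T index stack alive counts).length = alive.length ∧
      (∀ k, (pvLoopB T index stack alive counts).getD k false = true →
          alive.getD k false = true) ∧
      (∀ k, k < T.length → (pvLoopB T index stack alive counts).getD k false = true →
          ∀ x ∈ T.getD k [], pvCnt T (pvLoopB T index stack alive counts) x ≠ 1) ∧
      (∀ S : List Bool, S.length = T.length →
          (∀ k, k < T.length → S.getD k false = true → ∀ x ∈ T.getD k [], pvCnt T S x ≠ 1) →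
          (∀ k, k < T.length → S.getD k false = true → alive.getD k false = true) →
          ∀ k, k < T.length → S.getD k false = true →
            (pvLoopB T index stack alive counts).getD k false = true) := by
  intro stack alive counts
  induction stack, alive, counts using pvLoopB.induct T index with
  | case1 stack alive counts hs =>
    intro hlen hcnt hi2 hi3
    have hnil : stack = [] := List.getLast?_eq_none_iff.mp hs
    subst hnil
    rw [pvLoopB]
    split
    · refine ⟨rfl, fun k h => h, ?_, fun S _ _ hle k hk hSk => hle k hk hSk⟩
      intro k hkT hak x hx h1
      exact absurd (hi3 k hkT hak ⟨x, hx, h1⟩) (List.not_mem_nil)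
    · next heq => simp at heq
  | case2 stack alive counts i hs rest hA alive2 res ih =>
    intro hlen hcnt hi2 hi3
    obtain ⟨n₀, hn₀, han₀, he, hkn, hidx0⟩ := pv_pySetD_spec alive i hA
    have he' : alive2 = alive.set n₀ false := he
    have hlen2 : alive2.length = alive.length := by rw [he']; simp
    have hlen2T : alive2.length = T.length := hlen2.trans hlen
    have hn₀T : n₀ < T.length := hlen ▸ hn₀
    have hgn₀ : alive.getD n₀ false = true := by
      rw [List.getD_eq_getElem _ _ hn₀]; exact han₀
    have hTl : PySem.List.pyGetD T i [] = T.getD n₀ [] :=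
      pv_pyGetD_of_idx T i n₀ [] (by rw [← hlen] at *; exact hidx0)
    have hc' : ∀ v, res.1.getD v 0
        = counts.getD v 0 - (((PySem.List.pyGetD T i []).count v : Nat) : Int) :=
      fun v => pv_fold_counts index alive2 _ counts [] v
    have hkill : ∀ x, pvCnt T alive x
        = (T.getD n₀ []).count x + pvCnt T (alive.set n₀ false) x :=
      fun x => pv_cnt_kill T alive n₀ x hlen hn₀T hgn₀
    have hcnt' : ∀ x, res.1.getD x 0 = (pvCnt T alive2 x : Int) := by
      intro x
      rw [hc' x, hcnt x, hkill x, hTl, he']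
      push_cast; ring
    have hptwise : ∀ k, alive2.getD k false = true → alive.getD k false = true := by
      intro k hk
      rw [he'] at hk
      exact pv_getD_set_false_le alive n₀ k hk
    have hmono : ∀ x, pvCnt T alive2 x ≤ pvCnt T alive x := fun x =>
      pv_cnt_mono T alive2 alive x hlen2T hlen (fun k _ => hptwise k)
    have hne : stack ≠ [] := by intro e; subst e; simp at hs
    have hstackdec : stack.dropLast ++ [i] = stack := by
      have hgl : stack.getLast hne = i := by
        have hq := List.getLast?_eq_some_getLast hne
        rw [hs] at hq; exact (Option.some.inj hq).symm
      rw [← hgl]; exact List.dropLast_append_getLast hne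
    have hi2' : ∀ j ∈ stack.dropLast ++ res.2, ∃ k : Nat, j = (k : Int) ∧ k < T.length ∧
        (alive2.getD k false = true → ∃ x ∈ T.getD k [], pvCnt T alive2 x = 1) := by
      intro j hj
      rcases List.mem_append.mp hj with hr | happ
      · obtain ⟨k, rfl, hkT, hviol⟩ := hi2 j ((List.dropLast_sublist stack).subset hr)
        refine ⟨k, rfl, hkT, fun hk2 => ?_⟩
        obtain ⟨x, hx, hc1⟩ := hviol (hptwise k hk2)
        refine ⟨x, hx, ?_⟩
        have hup := hmono x
        have hlo : 1 ≤ pvCnt T alive2 x := pv_cnt_lower T alive2 k x hlen2T hkT hk2 hx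
        omega
      · rcases pv_fold_sound index alive2 _ counts [] j happ with h0 | ⟨x, _, hjidx, hal2, hle⟩
        · simp at h0
        · obtain ⟨k, hkT, rfl, hxk⟩ := (HI x j).mp hjidx
          refine ⟨k, rfl, hkT, fun _ => ?_⟩
          refine ⟨x, hxk, ?_⟩
          rw [PySem.List.pyGetD_natCast] at hal2
          have h1 : (pvCnt T alive2 x : Int) ≤ 1 := (hcnt' x) ▸ hle
          have h2 : 1 ≤ pvCnt T alive2 x := pv_cnt_lower T alive2 k x hlen2T hkT hal2 hxk
          omega
    have hi3' : ∀ k, k < T.length → alive2.getD k false = true →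
        (∃ x ∈ T.getD k [], pvCnt T alive2 x = 1) → (k : Int) ∈ stack.dropLast ++ res.2 := by
      rintro k hkT hk2 ⟨x, hx, hc1⟩
      by_cases hold : pvCnt T alive x = 1
      · have hmem := hi3 k hkT (hptwise k hk2) ⟨x, hx, hold⟩
        rw [← hstackdec] at hmem
        rcases List.mem_append.mp hmem with h | h
        · exact List.mem_append_left _ h
        · exfalso
          have hki : (k : Int) = i := by simpa using h
          have hk0 : k = n₀ := hkn k hki
          rw [hk0, he', pv_getD_set_self alive n₀ hn₀] at hk2
          exact Bool.noConfusion hk2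
      · have hxl : x ∈ T.getD n₀ [] := by
          by_contra hxn
          have hz : (T.getD n₀ []).count x = 0 := List.count_eq_zero.mpr hxn
          have hkx := hkill x
          rw [hz, ← he'] at hkx
          omega
        refine List.mem_append_right _ ?_
        refine pv_fold_complete index alive2 (PySem.List.pyGetD T i []) counts [] x
          (by rw [hTl]; exact hxl) ?_ (k : Int) ?_ ?_
        · exact (hcnt' x).trans (by rw [hc1]; norm_num)
        · exact (HI x (k : Int)).mpr ⟨k, hkT, rfl, hx⟩
        · rw [PySem.List.pyGetD_natCast]; exact hk2
    obtain ⟨o1, o2, o3, o4⟩ := ih hlen2T hcnt' hi2' hi3'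
    rw [pvLoopB]
    split
    · next heq => rw [hs] at heq; exact absurd heq (by simp)
    · next i' heq =>
      have hii : i = i' := by rw [hs] at heq; exact Option.some.inj heq
      subst hii
      rw [dif_pos hA]
      refine ⟨o1.trans hlen2, fun k hk => hptwise k (o2 k hk), o3, ?_⟩
      intro S hSlen hSvf hSle k hkT hSk
      refine o4 S hSlen hSvf ?_ k hkT hSk
      intro k' hk' hSk'
      by_cases hkn0 : k' = n₀
      · exfalso
        have hSn₀ : S.getD n₀ false = true := hkn0 ▸ hSk'
        have himem : i ∈ stack := by
          rw [← hstackdec]; exact List.mem_append_right _ List.mem_cons_self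
        obtain ⟨k'', hk''e, _, hviol⟩ := hi2 i himem
        have hkk : k'' = n₀ := hkn k'' hk''e.symm
        rw [hkk] at hviol
        obtain ⟨x, hx, hc1⟩ := hviol hgn₀
        have h1 : pvCnt T S x ≤ pvCnt T alive x :=
          pv_cnt_mono T S alive x hSlen hlen hSle
        have h2 : 1 ≤ pvCnt T S x := pv_cnt_lower T S n₀ x hSlen hn₀T hSn₀ hx
        exact hSvf n₀ hn₀T hSn₀ x hx (by omega)
      · have hal : alive.getD k' false = true := hSle k' hk' hSk'
        rw [he', List.getD, List.getElem?_set_ne (Ne.symm hkn0)]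
        rw [List.getD] at hal
        exact hal
  | case3 stack alive counts i hs rest hA ih =>
    intro hlen hcnt hi2 hi3
    have hne : stack ≠ [] := by intro e; subst e; simp at hs
    have hstackdec : stack.dropLast ++ [i] = stack := by
      have hgl : stack.getLast hne = i := by
        have hq := List.getLast?_eq_some_getLast hne
        rw [hs] at hq; exact (Option.some.inj hq).symm
      rw [← hgl]; exact List.dropLast_append_getLast hne
    have hi2' : ∀ j ∈ stack.dropLast, ∃ k : Nat, j = (k : Int) ∧ k < T.length ∧
        (alive.getD k false = true → ∃ x ∈ T.getD k [], pvCnt T alive x = 1) :=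
      fun j hj => hi2 j ((List.dropLast_sublist stack).subset hj)
    have hi3' : ∀ k, k < T.length → alive.getD k false = true →
        (∃ x ∈ T.getD k [], pvCnt T alive x = 1) → (k : Int) ∈ stack.dropLast := by
      intro k hkT hak hex
      have hmem := hi3 k hkT hak hex
      rw [← hstackdec] at hmem
      rcases List.mem_append.mp hmem with h | h
      · exact h
      · exfalso
        have hki : (k : Int) = i := by simpa using h
        apply hA
        rw [← hki, PySem.List.pyGet?_natCast,
          List.getElem?_eq_getElem (by omega : k < alive.length)]
        rw [List.getD_eq_getElem _ _ (by omega : k < alive.length)] at hak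
        rw [hak]
    obtain ⟨o1, o2, o3, o4⟩ := ih hlen hcnt hi2' hi3'
    rw [pvLoopB]
    split
    · next heq => rw [hs] at heq; exact absurd heq (by simp)
    · next i' heq =>
      have hii : i = i' := by rw [hs] at heq; exact Option.some.inj heq
      subst hii
      rw [dif_neg hA]
      exact ⟨o1, o2, o3, o4⟩

theorem pv_countsB_getD (tr : List (List Int)) (v : Int) :
    (pvCountsB tr).getD v 0 = (tr.flatten.count v : Int) := by
  suffices h : ∀ (tr : List (List Int)) (d : PySem.Dict Int Int),
      (tr.foldl (fun c t => t.foldl (fun d x => d.insert x (d.getD x 0 + 1)) c) d).getD v 0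
        = d.getD v 0 + (tr.flatten.count v : Int) by
    simpa [pvCountsB] using h tr PySem.Dict.empty
  intro tr
  induction tr with
  | nil => simp
  | cons t ts ih =>
    intro d
    rw [List.foldl_cons, ih, PySem.Dict.getD_foldl_insert_add_one]
    simp [List.count_append]
    ring

theorem pv_surv_nil (T : List (List Int)) : pvSurv T [] = [] := by
  cases T <;> rfl

-- the returned comprehension is exactly the alive sublist
theorem pv_out_eq_surv : ∀ (T : List (List Int)) (s : Nat) (al : List Bool),
    ((PySem.List.enumerate T (s : Int)).filter
        (fun p => PySem.List.pyGetD al p.1 false)).map (·.2) = pvSurv T (al.drop s) := by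
  intro T
  induction T with
  | nil => intro s al; rfl
  | cons t T ih =>
    intro s al
    rw [PySem.List.enumerate_cons, List.filter_cons]
    have hnext : ((s : Int) + 1) = (((s + 1 : Nat)) : Int) := by push_cast; ring
    rcases hdrop : al.drop s with _ | ⟨b, rest⟩
    · have hs : al.length ≤ s := List.drop_eq_nil_iff.mp hdrop
      have hg : al.getD s false = false := List.getD_eq_default _ _ hs
      rw [PySem.List.pyGetD_natCast, hg]
      simp only [Bool.false_eq_true, if_false]
      rw [hnext, ih (s + 1) al]
      have : al.drop (s + 1) = [] := List.drop_eq_nil_iff.mpr (by omega)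
      rw [this, pv_surv_nil, pv_surv_nil]
    · have hb : al.getD s false = b := by
        have h0 : (al.drop s)[0]? = al[s + 0]? := List.getElem?_drop
        rw [hdrop] at h0
        simp only [List.getElem?_cons_zero, Nat.add_zero] at h0
        rw [List.getD, ← h0]
        rfl
      have hrest : rest = al.drop (s + 1) := by
        have ht : (al.drop s).tail = al.drop (s + 1) := List.tail_drop
        rw [hdrop] at ht
        exact (by simpa using ht : rest = al.drop (s + 1))
      rw [PySem.List.pyGetD_natCast, hb]
      cases b with
      | false =>
        simp only [Bool.false_eq_true, if_false]
        rw [hnext, ih (s + 1) al, pvSurv, if_neg (by simp)]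
        rw [hrest]
      | true =>
        simp only [if_true]
        rw [List.map_cons, hnext, ih (s + 1) al, pvSurv, if_pos rfl]
        rw [hrest]

-- ---- assembly ----
theorem pv_B_props (T : List (List Int)) (hT : T.Nodup) :
    (filter_trinities_alt T).Sublist T ∧ pvVF (filter_trinities_alt T) ∧
    (∀ S, S.Nodup → pvVF S → S ⊆ T → S ⊆ filter_trinities_alt T) := by
  have hidx := pv_index_mem T
  have hlen0 : (List.replicate T.length true).length = T.length := by simp
  have hcnt0 : ∀ x, (pvCountsB T).getD x 0
      = (pvCnt T (List.replicate T.length true) x : Int) := fun x => by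
    rw [pv_countsB_getD, pv_cnt_replicate]
  have hget0 : ∀ k, k < T.length → (List.replicate T.length true).getD k false = true :=
    fun k hk => List.getD_replicate _ hk
  have hcnteq : ∀ x, pvCnt T (List.replicate T.length true) x = T.flatten.count x :=
    fun x => pv_cnt_replicate T x
  have hi2 : ∀ j ∈ ((PySem.List.enumerate T).filter
        (fun p => p.2.any (fun x => (pvCountsB T).getD x 0 == 1))).map (·.1),
      ∃ k : Nat, j = (k : Int) ∧ k < T.length ∧
        ((List.replicate T.length true).getD k false = true →
          ∃ x ∈ T.getD k [], pvCnt T (List.replicate T.length true) x = 1) := by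
    intro j hj
    obtain ⟨p, hpf, hpj⟩ := List.mem_map.mp hj
    obtain ⟨hpm, hcond⟩ := List.mem_filter.mp hpf
    obtain ⟨k, hk, hpe⟩ := (PySem.List.mem_enumerate_iff _ _ _).mp hpm
    subst hpe
    simp only [zero_add] at hpj
    obtain ⟨x, hx, hbeq⟩ := List.any_eq_true.mp hcond
    simp only at hx
    rw [beq_iff_eq, hcnt0 x] at hbeq
    refine ⟨k, hpj.symm, hk, fun _ => ⟨x, ?_, by exact_mod_cast hbeq⟩⟩
    rw [List.getD_eq_getElem _ _ hk]
    exact hx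
  have hi3 : ∀ k, k < T.length → (List.replicate T.length true).getD k false = true →
      (∃ x ∈ T.getD k [], pvCnt T (List.replicate T.length true) x = 1) →
      (k : Int) ∈ ((PySem.List.enumerate T).filter
        (fun p => p.2.any (fun x => (pvCountsB T).getD x 0 == 1))).map (·.1) := by
    rintro k hk _ ⟨x, hx, hc1⟩
    refine List.mem_map.mpr ⟨((k : Int), T[k]), List.mem_filter.mpr ⟨?_, ?_⟩, rfl⟩
    · exact (PySem.List.mem_enumerate_iff _ _ _).mpr ⟨k, hk, by simp⟩
    · refine List.any_eq_true.mpr ⟨x, ?_, ?_⟩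
      · rw [List.getD_eq_getElem _ _ hk] at hx
        exact hx
      · rw [beq_iff_eq, hcnt0 x, hc1]
        norm_num
  obtain ⟨o1, o2, o3, o4⟩ := pv_loopB_master T (pvIndexB T) hidx _ _ _ hlen0 hcnt0 hi2 hi3
  set alF := pvLoopB T (pvIndexB T)
    (((PySem.List.enumerate T).filter
      (fun p => p.2.any (fun x => (pvCountsB T).getD x 0 == 1))).map (·.1))
    (List.replicate T.length true) (pvCountsB T) with halF
  have hlenF : alF.length = T.length := by rw [halF]; rw [o1]; exact hlen0
  have hsurvnd : (pvSurv T alF).Nodup := (pv_surv_sublist T alF).nodup hT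
  have hsurv : filter_trinities_alt T = pvSurv T alF := by
    unfold filter_trinities_alt
    dsimp only
    rw [← halF]
    have hout := pv_out_eq_surv T 0 alF
    simp only [Nat.cast_zero, List.drop_zero] at hout
    rw [hout]
    exact pv_ofList_nodup _ hsurvnd
  refine ⟨hsurv ▸ pv_surv_sublist T alF, ?_, ?_⟩
  · intro t ht x hx
    rw [hsurv] at ht ⊢
    obtain ⟨k, hk, hak, hTk⟩ := (pv_surv_mem T alF t hlenF).mp ht
    rw [pv_surv_flatten_count T alF x hlenF]
    exact o3 k hk hak x (hTk ▸ hx)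
  · intro S hSn hSv hST t htS
    rw [hsurv]
    obtain ⟨k, hk, hTk⟩ := List.mem_iff_getElem.mp (hST htS)
    set SB := (List.range T.length).map (fun k => decide (T.getD k [] ∈ S)) with hSB
    have hSBlen : SB.length = T.length := by simp [hSB]
    have hSBgetD : ∀ k', k' < T.length → SB.getD k' false = decide (T.getD k' [] ∈ S) := by
      intro k' hk'
      rw [hSB, List.getD_eq_getElem _ _ (by simpa using hk')]
      simp
    have hflatcnt : ∀ x, pvCnt T SB x = S.flatten.count x := by
      intro x
      rw [← pv_surv_flatten_count T SB x hSBlen, hSB,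
        pv_surv_of_range_pred T (fun u => decide (u ∈ S))]
      have hsub1 : (T.filter (fun u => decide (u ∈ S))) ⊆ S := fun u hu => by
        simpa using (List.mem_filter.mp hu).2
      have hsub2 : S ⊆ T.filter (fun u => decide (u ∈ S)) := fun u hu =>
        List.mem_filter.mpr ⟨hST hu, by simpa⟩
      have h1 := pv_subset_flatten_count_le _ S x (List.Sublist.nodup List.filter_sublist hT) hsub1
      have h2 := pv_subset_flatten_count_le S _ x hSn hsub2
      omega
    have hSBvf : ∀ k', k' < T.length → SB.getD k' false = true →
        ∀ x ∈ T.getD k' [], pvCnt T SB x ≠ 1 := by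
      intro k' hk' hSBk x hx
      rw [hflatcnt x]
      have hmem : T.getD k' [] ∈ S := by
        have := (hSBgetD k' hk').symm.trans hSBk
        simpa using this
      exact hSv _ hmem x hx
    have hSBle : ∀ k', k' < T.length → SB.getD k' false = true →
        (List.replicate T.length true).getD k' false = true := fun k' hk' _ => hget0 k' hk'
    have hSBk : SB.getD k false = true := by
      rw [hSBgetD k hk]
      simp only [decide_eq_true_eq]
      rw [List.getD_eq_getElem _ _ hk, hTk]
      exact htS
    have halFk := o4 SB hSBlen hSBvf hSBle k hk hSBk
    exact (pv_surv_mem T alF t hlenF).mpr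
      ⟨k, hk, halFk, by rw [List.getD_eq_getElem _ _ hk, hTk]⟩

-- ===== VERDICT (by name: the statement is the Claim_ definition above) =====
theorem filter_trinities_spec : Claim_equal_filter_trinities := by
  intro T _ hT
  unfold Spec_filter_trinities
  obtain ⟨hsubA, hvfA, hmaxA⟩ :=
    pv_loopA_master (T.length + 1) T hT (Nat.lt_succ_self _)
  obtain ⟨hsubB, hvfB, hmaxB⟩ := pv_B_props T hT
  have hA : (filter_trinities T).Sublist T := hsubA
  refine pv_sublist_eq_of_mem_iff T _ _ hT hA hsubB (fun t => ⟨?_, ?_⟩)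
  · intro ht
    exact hmaxB (filter_trinities T) (hA.nodup hT) hvfA hA.subset ht
  · intro ht
    exact hmaxA (filter_trinities_alt T) (hsubB.nodup hT) hvfB hsubB.subset ht
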